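-- pv_equiv track=rewrite | github.com/Math-Lins/Exerc-cios-de-Python- | Python - aula/FUNCOES.py | texto
-- ===== SOURCE A (Python) =====
-- def texto(t):
--     textoi=""
--     cont = 0
--     for x in range(len(t)-1,-1,-1):
--         textoi+= t[x]
--         if t[x] != " ":
--             cont+=1
--     return t, cont, textoi
-- ===== SOURCE B (Python) =====
-- def texto(t):
--     return t, len(t) - t.count(' '), t[::-1]
-- ===== Notes on version B (the rewrite author's own statement) =====
-- stated objective: idiomatic
-- what changed: Replaces the single backward index loop that builds the reversed string and counts non-space chars with two independent whole-string operations: slicing t[::-1] for the reversal and len(t) - t.count(' ') for the count.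
import Mathlib
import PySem

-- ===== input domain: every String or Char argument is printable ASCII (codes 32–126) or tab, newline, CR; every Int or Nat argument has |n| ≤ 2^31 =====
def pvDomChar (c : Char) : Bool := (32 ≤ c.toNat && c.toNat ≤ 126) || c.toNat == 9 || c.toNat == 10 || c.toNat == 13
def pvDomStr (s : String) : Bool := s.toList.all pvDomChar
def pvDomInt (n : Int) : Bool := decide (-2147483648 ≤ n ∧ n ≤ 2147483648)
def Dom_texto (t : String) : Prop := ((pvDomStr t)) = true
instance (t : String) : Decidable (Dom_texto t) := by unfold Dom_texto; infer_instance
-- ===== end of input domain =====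

-- B replaces A's backward index loop with two independent whole-string operations
-- (slice reversal and len − count of spaces); same return value, idiomatic rewrite.

-- ===== PORT A =====
-- A: for x in range(len(t)-1,-1,-1): textoi += t[x]; if t[x] != " ": cont += 1
-- The index x is always in range, so t[x] is ported with pyGetD (default never used).
def texto (t : String) : String × Int × String :=
  let cs := t.toList
  let st := (PySem.List.pyRange ((PySem.Chars.len cs : Int) - 1) (-1) (-1)).foldl
    (fun (st : List Char × Int) x =>
      let c := PySem.List.pyGetD cs x ' '
      (st.1 ++ [c], if c ≠ ' ' then st.2 + 1 else st.2))
    ([], 0)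
  (t, st.2, String.ofList st.1)

-- ===== PORT B =====
-- B: return t, len(t) - t.count(' '), t[::-1]
-- t[::-1] is Str.slice? with step -1, which never raises for step -1 (getD "" unreachable).
def texto_alt (t : String) : String × Int × String :=
  (t, (PySem.Str.len t : Int) - (PySem.Str.count t " " : Int),
   (PySem.Str.slice? t none none (-1)).getD "")

-- ===== PRECONDITION & SPEC =====
def Spec_texto (t : String) (out : String × Int × String) : Prop := out = texto_alt t
instance (t : String) (out : String × Int × String) : Decidable (Spec_texto t out) := by unfold Spec_texto; infer_instance

-- ===== CLAIM (what is proved, stated in full; the proofs are below) =====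
def Claim_equal_texto : Prop := ∀ (t : String), Dom_texto t → Spec_texto t (texto t)

-- ===== LEMMAS AND PROOFS =====

-- Python's s.count(" ") (non-overlapping substring count) equals List.count for a single char.
theorem count_go_single (c : Char) : ∀ (fuel : Nat) (l : List Char) (acc : Nat),
    l.length ≤ fuel → PySem.Chars.count.go [c] fuel l acc = acc + l.count c := by
  intro fuel
  induction fuel with
  | zero =>
    intro l acc h
    have : l = [] := List.eq_nil_of_length_eq_zero (Nat.le_zero.mp h)
    subst this; simp [PySem.Chars.count.go]
  | succ n ih =>
    intro l acc h
    cases l with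
    | nil => simp [PySem.Chars.count.go]
    | cons hd tl =>
      have hlen : tl.length ≤ n := by simpa using Nat.lt_succ_iff.mp (by simpa using h)
      simp only [PySem.Chars.count.go]
      by_cases hc : c = hd
      · subst hc
        simp only [List.isPrefixOf, BEq.rfl, Bool.true_and,
          if_true, List.length_cons, List.length_nil, List.drop_succ_cons, List.drop_zero]
        rw [ih tl (acc + 1) hlen]
        simp [List.count_cons]
        omega
      · have hpf : ([c].isPrefixOf (hd :: tl)) = false := by
          simp [List.isPrefixOf, hc]
        rw [hpf]
        simp only [if_false, Bool.false_eq_true]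
        rw [ih tl acc hlen]
        simp [List.count_cons]
        exact fun h' => hc h'.symm

theorem count_single (cs : List Char) (c : Char) :
    PySem.Chars.count cs [c] = cs.count c := by
  rw [PySem.Chars.count]
  simp [count_go_single c cs.length cs 0 le_rfl]

-- A's fold over the countdown range, seen on List.range: after m steps the state is
-- (first m chars of cs.reverse, number of non-spaces among them).
theorem foldA_range (cs : List Char) (n : Nat) (hn : n = cs.length) :
    ∀ (m : Nat), m ≤ n →
    List.foldl (fun (st : List Char × Int) (k : Nat) =>
        let c := PySem.List.pyGetD cs ((n : Int) - 1 - k) ' '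
        (st.1 ++ [c], if c ≠ ' ' then st.2 + 1 else st.2))
      (([] : List Char), (0 : Int)) (List.range m)
      = (cs.reverse.take m, ((cs.reverse.take m).countP (fun c => c ≠ ' ') : Int)) := by
  intro m
  induction m with
  | zero => intro _; simp
  | succ m ih =>
    intro hm
    have hmn : m < n := hm
    have hm' : m < cs.reverse.length := by simpa [hn] using hmn
    rw [List.range_succ, List.foldl_append, ih (Nat.le_of_lt hmn)]
    simp only [List.foldl_cons, List.foldl_nil]
    have hidx : PySem.List.pyGetD cs ((n : Int) - 1 - m) ' ' = cs.reverse[m]'hm' := by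
      rw [PySem.List.pyGetD_eq_getElem cs ' ' (by omega) (by rw [← hn]; omega)]
      rw [List.getElem_reverse]
      congr 1
      omega
    have htake : cs.reverse.take (m + 1) = cs.reverse.take m ++ [cs.reverse[m]'hm'] := by
      rw [List.take_add_one, List.getElem?_eq_getElem hm']
      rfl
    refine Prod.ext ?_ ?_
    · simp only [htake, hidx]
    · show (if PySem.List.pyGetD cs ((n : Int) - 1 - m) ' ' ≠ ' '
          then ((cs.reverse.take m).countP (fun c => c ≠ ' ') : Int) + 1
          else ((cs.reverse.take m).countP (fun c => c ≠ ' ') : Int))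
        = ((cs.reverse.take (m+1)).countP (fun c => c ≠ ' ') : Int)
      rw [hidx, htake, List.countP_append, List.countP_cons]
      by_cases hc : cs.reverse[m]'hm' = ' '
      · simp only [ne_eq, hc, not_true_eq_false, if_false, List.countP_cons, List.countP_nil,
          decide_not, decide_true, Bool.not_true, Bool.false_eq_true, if_false]
        simp
      · simp only [ne_eq, hc, not_false_eq_true, if_true, List.countP_cons, List.countP_nil,
          decide_not, decide_false, Bool.not_false, if_true]
        simp

theorem texto_eval (t : String) :
    texto t = (t, (t.toList.countP (fun c => c ≠ ' ') : Int), String.ofList t.toList.reverse) := by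
  unfold texto
  simp only [PySem.Chars.len_eq, PySem.List.pyRange_neg_one]
  have h1 : ((t.toList.length : Int) - 1 - -1).toNat = t.toList.length := by omega
  rw [h1, List.foldl_map]
  have hfull := foldA_range t.toList t.toList.length rfl t.toList.length le_rfl
  have hrev : t.toList.reverse.take t.toList.length = t.toList.reverse :=
    List.take_of_length_le (by simp)
  rw [hrev] at hfull
  rw [hfull]
  simp [List.countP_reverse]

-- ===== VERDICT (by name: the statement is the Claim_ definition above) =====
theorem texto_spec : Claim_equal_texto := by
  intro t _
  unfold Spec_texto texto_alt
  rw [texto_eval, PySem.Str.slice?_none_none_neg_one]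
  simp only [Option.getD_some]
  refine Prod.ext rfl (Prod.ext ?_ rfl)
  show (t.toList.countP (fun c => c ≠ ' ') : Int) = (PySem.Str.len t : Int) - (PySem.Str.count t " " : Int)
  rw [PySem.Str.count_eq, PySem.Str.len_eq]
  have hsub : (" " : String).toList = [' '] := rfl
  rw [hsub, count_single]
  simp only [ne_eq, decide_not]
  have key : t.toList.countP (fun c => !decide (c = ' ')) + t.toList.count ' ' = t.toList.length := by
    induction t.toList with
    | nil => simp
    | cons hd tl ih =>
      by_cases h : hd = ' '
      · subst h
        simp [List.count_cons, List.countP_cons]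
        omega
      · simp [List.count_cons, List.countP_cons, h]
        omega
  omega
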